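-- pv_equiv track=rewrite | github.com/paulonteri/data-structures-and-algorithms | solutions/Stacks & Queues/sunset_views.py | sunsetViews1
-- ===== SOURCE A (Python) =====
-- def sunsetViews1(buildings, direction):
--     if not len(buildings):
--         return []
--
--     stack = []  # stores indexes of the tallest buildings
--
--     if direction == "EAST":
--         stack.append(0)
--         for idx in range(1, len(buildings)):
--             height = buildings[idx]
--             while len(stack) > 0 and height >= buildings[stack[0]]:
--                 stack.pop(0)
--             stack.insert(0, idx)
--
--         stack.reverse()
--
--     else:
--         stack.append(len(buildings)-1)
--         for idx in reversed(range(len(buildings)-1)):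
--             height = buildings[idx]
--             while len(stack) > 0 and height >= buildings[stack[0]]:
--                 stack.pop(0)
--             stack.insert(0, idx)
--
--     return stack
-- ===== SOURCE B (Python) =====
-- def sunsetViews1(buildings, direction):
--     # Running-max scan from the sun-facing side: a building sees the sunset
--     # iff it is strictly taller than every building between it and the sun,
--     # i.e. taller than the running maximum. No stack, no popping.
--     res = []
--     best = None
--     if direction == "EAST":
--         for i in reversed(range(len(buildings))):
--             h = buildings[i]
--             if best is None or h > best:
--                 res.append(i)
--                 best = h
--         res.reverse()
--         return res
--     for i in range(len(buildings)):
--         h = buildings[i]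
--         if best is None or h > best:
--             res.append(i)
--             best = h
--     return res
-- ===== Notes on version B (the rewrite author's own statement) =====
-- stated objective: faster
-- what changed: Replaces A's monotonic stack (with O(n) front pops/inserts) by a stackless running-maximum scan from the sun-facing side: a building is kept iff it is strictly taller than the running max, so nothing is ever popped or re-examined.
import Mathlib
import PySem

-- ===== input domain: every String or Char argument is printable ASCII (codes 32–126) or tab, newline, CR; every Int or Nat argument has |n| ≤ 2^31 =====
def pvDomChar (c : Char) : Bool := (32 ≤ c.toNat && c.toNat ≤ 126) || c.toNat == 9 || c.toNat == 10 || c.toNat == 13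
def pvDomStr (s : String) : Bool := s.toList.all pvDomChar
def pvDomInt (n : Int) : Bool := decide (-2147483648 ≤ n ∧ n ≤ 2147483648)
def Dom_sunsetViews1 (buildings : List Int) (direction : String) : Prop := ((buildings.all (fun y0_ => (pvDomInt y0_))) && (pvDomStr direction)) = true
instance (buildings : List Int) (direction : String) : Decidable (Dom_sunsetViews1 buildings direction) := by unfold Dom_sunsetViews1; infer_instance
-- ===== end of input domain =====

-- B replaces A's monotonic stack (front pops/inserts) by a stackless running-maximum
-- scan from the sun-facing side; objective: faster (nothing is ever popped or re-examined).

-- buildings[i] for an in-range index (shared shorthand used by both ports)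
def pvH (b : List Int) (i : Int) : Int := (PySem.List.pyGet? b i).getD 0

-- ===== PORT A =====
-- A's inner while loop: pop from the FRONT of `stack` while height >= buildings[stack[0]]
def pvPopA (b : List Int) (h : Int) : List Int → List Int
  | [] => []
  | t :: rest => if h ≥ pvH b t then pvPopA b h rest else t :: rest

-- A's loop body: pop-from-front, then stack.insert(0, idx)
def pvStepA (b : List Int) (stack : List Int) (idx : Int) : List Int :=
  idx :: pvPopA b (pvH b idx) stack

def sunsetViews1 (buildings : List Int) (direction : String) : List Int :=
  if buildings.length = 0 then []
  else if direction = "EAST" then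
    ((PySem.List.pyRange 1 (buildings.length : Int) 1).foldl (pvStepA buildings) [(0 : Int)]).reverse
  else
    ((PySem.List.pyRange 0 ((buildings.length : Int) - 1) 1).reverse.foldl
      (pvStepA buildings) [((buildings.length : Int) - 1)])

-- ===== PORT B =====
-- B's loop body: keep i iff taller than the running max (best); update best
def pvStepM (b : List Int) (st : List Int × Option Int) (i : Int) : List Int × Option Int :=
  let h := pvH b i
  match st.2 with
  | none => (st.1 ++ [i], some h)
  | some v => if h > v then (st.1 ++ [i], some h) else st

def sunsetViews1_alt (buildings : List Int) (direction : String) : List Int :=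
  if direction = "EAST" then
    (((PySem.List.pyRange 0 (buildings.length : Int) 1).reverse).foldl
      (pvStepM buildings) ([], none)).1.reverse
  else
    ((PySem.List.pyRange 0 (buildings.length : Int) 1).foldl (pvStepM buildings) ([], none)).1

-- ===== PRECONDITION & SPEC =====
def Spec_sunsetViews1 (buildings : List Int) (direction : String) (out : List Int) : Prop := out = sunsetViews1_alt buildings direction
instance (buildings : List Int) (direction : String) (out : List Int) : Decidable (Spec_sunsetViews1 buildings direction out) := by unfold Spec_sunsetViews1; infer_instance

-- ===== CLAIM =====
def Claim_equal_sunsetViews1 : Prop := ∀ (buildings : List Int) (direction : String), Dom_sunsetViews1 buildings direction → Spec_sunsetViews1 buildings direction (sunsetViews1 buildings direction)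

-- ===== LEMMAS AND PROOFS =====

-- The common specification: survivors of a processing order L, in L-order.
-- An index is kept iff it is strictly taller than every index after it in L.
def pvSurvSpec (b : List Int) : List Int → List Int
  | [] => []
  | x :: rest =>
      if rest.all (fun k => pvH b k < pvH b x) then x :: pvSurvSpec b rest
      else pvSurvSpec b rest

-- max of pvH over a list, as B's `best` computes it
def pvMaxH (b : List Int) : List Int → Option Int
  | [] => none
  | x :: M =>
      match pvMaxH b M with
      | none => some (pvH b x)
      | some v => some (max (pvH b x) v)

theorem pvSurvSpec_subset (b : List Int) :
    ∀ M, ∀ j ∈ pvSurvSpec b M, j ∈ M := by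
  intro M
  induction M with
  | nil => simp [pvSurvSpec]
  | cons x rest ih =>
      intro j hj
      simp only [pvSurvSpec] at hj
      by_cases hc : rest.all (fun k => pvH b k < pvH b x)
      · rw [if_pos hc] at hj
        rcases List.mem_cons.mp hj with h | h
        · exact h ▸ List.mem_cons_self
        · exact List.mem_cons_of_mem _ (ih j h)
      · rw [if_neg hc] at hj
        exact List.mem_cons_of_mem _ (ih j hj)

theorem pvSurvSpec_pairwise (b : List Int) :
    ∀ M, (pvSurvSpec b M).Pairwise (fun a c => pvH b c < pvH b a) := by
  intro M
  induction M with
  | nil => simp [pvSurvSpec]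
  | cons x rest ih =>
      simp only [pvSurvSpec]
      by_cases hc : rest.all (fun k => pvH b k < pvH b x)
      · rw [if_pos hc]
        refine List.Pairwise.cons ?_ ih
        intro c hc'
        exact of_decide_eq_true ((List.all_eq_true.mp hc) c (pvSurvSpec_subset b rest c hc'))
      · rw [if_neg hc]; exact ih

-- appending one more processed index filters the earlier survivors
theorem pvSurvSpec_append (b : List Int) (y : Int) :
    ∀ M, pvSurvSpec b (M ++ [y])
      = (pvSurvSpec b M).filter (fun j => decide (pvH b y < pvH b j)) ++ [y] := by
  intro M
  induction M with
  | nil => simp [pvSurvSpec]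
  | cons x rest ih =>
      simp only [List.cons_append, pvSurvSpec, ih]
      by_cases hall : rest.all (fun k => pvH b k < pvH b x)
      · by_cases hy : pvH b y < pvH b x
        · rw [if_pos (by simp_all), if_pos hall]
          simp [hy]
        · rw [if_neg (by simp_all), if_pos hall]
          simp [hy]
      · rw [if_neg (by simp_all), if_neg hall]

-- A's front-popping on a height-increasing list is a filter
theorem pvPopA_eq_filter (b : List Int) (h : Int) :
    ∀ l : List Int, l.Pairwise (fun a c => pvH b a < pvH b c) →
      pvPopA b h l = l.filter (fun j => decide (h < pvH b j)) := by
  intro l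
  induction l with
  | nil => intro _; simp [pvPopA]
  | cons t rest ih =>
      intro hp
      rcases List.pairwise_cons.mp hp with ⟨ht, hrest⟩
      simp only [pvPopA, List.filter_cons]
      by_cases hc : h ≥ pvH b t
      · rw [if_pos hc]
        have : ¬ h < pvH b t := not_lt.mpr hc
        simp only [this, decide_false]
        exact ih hrest
      · rw [if_neg hc]
        have h1 : h < pvH b t := lt_of_not_ge hc
        simp only [h1, decide_true]
        congr 1
        symm
        apply List.filter_eq_self.mpr
        intro j hj
        exact decide_eq_true (lt_trans h1 (ht j hj))

-- characterization of A's fold: the stack is the reversed survivor list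
theorem foldA_char (b : List Int) (x0 : Int) :
    ∀ rest : List Int, rest.foldl (pvStepA b) [x0] = (pvSurvSpec b (x0 :: rest)).reverse := by
  intro rest
  induction rest using List.reverseRecOn with
  | nil => simp [pvSurvSpec]
  | append_singleton M y ih =>
      rw [List.foldl_append, ih, List.foldl_cons, List.foldl_nil]
      have hpw : ((pvSurvSpec b (x0 :: M)).reverse).Pairwise (fun a c => pvH b a < pvH b c) := by
        rw [List.pairwise_reverse]; exact pvSurvSpec_pairwise b (x0 :: M)
      show pvStepA b (pvSurvSpec b (x0 :: M)).reverse y = _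
      rw [pvStepA, pvPopA_eq_filter b (pvH b y) _ hpw]
      have : x0 :: (M ++ [y]) = (x0 :: M) ++ [y] := by simp
      rw [this, pvSurvSpec_append]
      simp [List.filter_reverse]

theorem pvMaxH_none (b : List Int) : ∀ M, pvMaxH b M = none → M = [] := by
  intro M
  cases M with
  | nil => intro _; rfl
  | cons x rest =>
      intro h
      simp only [pvMaxH] at h
      cases hm : pvMaxH b rest <;> rw [hm] at h <;> simp at h

theorem pvMaxH_lt (b : List Int) :
    ∀ M v, pvMaxH b M = some v → ∀ h : Int,
      (M.all (fun k => pvH b k < h) = true ↔ v < h) := by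
  intro M
  induction M with
  | nil => intro v hv; simp [pvMaxH] at hv
  | cons x rest ih =>
      intro v hv h
      simp only [pvMaxH] at hv
      cases hm : pvMaxH b rest with
      | none =>
          rw [hm] at hv
          have hr : rest = [] := pvMaxH_none b rest hm
          subst hr
          simp only [Option.some.injEq] at hv
          simp [hv]
      | some w =>
          rw [hm] at hv
          simp only [Option.some.injEq] at hv
          subst hv
          simp only [List.all_cons, Bool.and_eq_true, decide_eq_true_eq]
          constructor
          · rintro ⟨h1, h2⟩
            exact max_lt h1 ((ih w hm h).mp h2)
          · intro hmax
            rcases max_lt_iff.mp hmax with ⟨h1, h2⟩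
            exact ⟨h1, (ih w hm h).mpr h2⟩

-- characterization of B's fold over L.reverse: survivors (L-order reversed) and the max
theorem foldB_char (b : List Int) :
    ∀ L : List Int, L.reverse.foldl (pvStepM b) ([], none)
      = ((pvSurvSpec b L).reverse, pvMaxH b L) := by
  intro L
  induction L with
  | nil => simp [pvSurvSpec, pvMaxH]
  | cons x M ih =>
      rw [List.reverse_cons, List.foldl_append, ih, List.foldl_cons, List.foldl_nil]
      cases hm : pvMaxH b M with
      | none =>
          have hM : M = [] := pvMaxH_none b M hm
          subst hM
          simp [pvStepM, pvSurvSpec, pvMaxH]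
      | some v =>
          simp only [pvStepM]
          by_cases hx : pvH b x > v
          · rw [if_pos hx]
            have hall : M.all (fun k => pvH b k < pvH b x) = true :=
              (pvMaxH_lt b M v hm (pvH b x)).mpr hx
            simp only [pvSurvSpec, hall, if_pos, List.reverse_cons, pvMaxH, hm]
            have : max (pvH b x) v = pvH b x := max_eq_left (le_of_lt hx)
            simp [this]
          · rw [if_neg hx]
            have hall : ¬ (M.all (fun k => pvH b k < pvH b x) = true) := by
              intro hc
              exact hx ((pvMaxH_lt b M v hm (pvH b x)).mp hc)
            simp only [pvSurvSpec, hall, pvMaxH, hm]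
            have : max (pvH b x) v = v := max_eq_right (le_of_not_gt hx)
            simp [this]

-- ===== VERDICT =====
theorem sunsetViews1_spec : Claim_equal_sunsetViews1 := by
  intro buildings direction _
  unfold Spec_sunsetViews1 sunsetViews1 sunsetViews1_alt
  by_cases h0 : buildings.length = 0
  · rw [if_pos h0, h0]
    simp [PySem.List.pyRange]
  · rw [if_neg h0]
    have hn : 0 < (buildings.length : Int) := by
      have : 0 < buildings.length := Nat.pos_of_ne_zero h0
      exact_mod_cast this
    have hsplit : PySem.List.pyRange 0 (buildings.length : Int) 1
        = PySem.List.pyRange 0 ((buildings.length : Int) - 1) 1 ++ [(buildings.length : Int) - 1] := by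
      have := PySem.List.pyRange_one_succ_right
        (a := 0) (b := (buildings.length : Int) - 1) (by omega)
      simpa [sub_add_cancel] using this
    by_cases hd : direction = "EAST"
    · rw [if_pos hd, if_pos hd]
      have hcons : PySem.List.pyRange 0 (buildings.length : Int) 1
          = 0 :: PySem.List.pyRange 1 (buildings.length : Int) 1 :=
        PySem.List.pyRange_one_cons hn
      rw [foldA_char, foldB_char, ← hcons]
    · rw [if_neg hd, if_neg hd]
      have hrev : (PySem.List.pyRange 0 (buildings.length : Int) 1).reverse
          = ((buildings.length : Int) - 1) :: (PySem.List.pyRange 0 ((buildings.length : Int) - 1) 1).reverse := by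
        rw [hsplit]; simp
      rw [foldA_char, ← hrev]
      have hB := foldB_char buildings ((PySem.List.pyRange 0 (buildings.length : Int) 1).reverse)
      rw [List.reverse_reverse] at hB
      rw [hB]
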